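-- pv_equiv track=rewrite | github.com/BrendonGeoffrinTanner/thermodynamics-of-diluted-spin-systems | Reseau 2D/Carree/graphique_cluster_reseau_carre.py | generate_rotations
-- ===== SOURCE A (Python) =====
-- def normalize(cluster):
--     """
--     Ramène les coordonnées du cluster de manière à ce que
--     le point le plus en haut à gauche soit (0, 0).
--     Permet de comparer les clusters indépendamment de leur position absolue.
--     """
--     xs, ys = zip(*cluster)
--     min_x, min_y = min(xs), min(ys)
--     return sorted((x - min_x, y - min_y) for x, y in cluster)
--
-- def generate_rotations(cluster):
--     """
--     Génère toutes les versions symétriques du cluster :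
--     - 4 rotations (0°, 90°, 180°, 270°)
--     - Pour chaque rotation, on ajoute aussi son miroir horizontal
--     Le but est d'identifier les formes équivalentes (isomorphes).
--     """
--     def rotate_90(pts): return [(-y, x) for x, y in pts]
--     def mirror_x(pts): return [(x, -y) for x, y in pts]
--
--     forms = set()
--     current = normalize(cluster)
--     for _ in range(4):
--         current = normalize(rotate_90(current))  # Applique rotation
--         forms.add(tuple(current))                # Ajoute la rotation
--         forms.add(tuple(normalize(mirror_x(current))))  # Ajoute son miroir
--     return forms
-- ===== SOURCE B (Python) =====
-- def normalize(cluster):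
--     xs, ys = zip(*cluster)
--     min_x, min_y = min(xs), min(ys)
--     return sorted((x - min_x, y - min_y) for x, y in cluster)
--
-- def generate_rotations(cluster):
--     # The dihedral group D4 as an explicit table of closed-form coordinate maps:
--     # the four rotations and each composed with the horizontal mirror y -> -y.
--     transforms = [
--         lambda x, y: (-y, x),   # R
--         lambda x, y: (-y, -x),  # mirror . R
--         lambda x, y: (-x, -y),  # R^2
--         lambda x, y: (-x, y),   # mirror . R^2
--         lambda x, y: (y, -x),   # R^3
--         lambda x, y: (y, x),    # mirror . R^3
--         lambda x, y: (x, y),    # R^4 = identity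
--         lambda x, y: (x, -y),   # mirror
--     ]
--     return {tuple(normalize([t(x, y) for x, y in cluster])) for t in transforms}
-- ===== Notes on version B (the rewrite author's own statement) =====
-- stated objective: alternative
-- what changed: Replaces A's stateful loop that threads a running `current` through repeated rotate-then-renormalize steps with an explicit table of the 8 dihedral transforms as closed-form coordinate maps, each applied directly to the original cluster and normalized once.
import Mathlib
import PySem

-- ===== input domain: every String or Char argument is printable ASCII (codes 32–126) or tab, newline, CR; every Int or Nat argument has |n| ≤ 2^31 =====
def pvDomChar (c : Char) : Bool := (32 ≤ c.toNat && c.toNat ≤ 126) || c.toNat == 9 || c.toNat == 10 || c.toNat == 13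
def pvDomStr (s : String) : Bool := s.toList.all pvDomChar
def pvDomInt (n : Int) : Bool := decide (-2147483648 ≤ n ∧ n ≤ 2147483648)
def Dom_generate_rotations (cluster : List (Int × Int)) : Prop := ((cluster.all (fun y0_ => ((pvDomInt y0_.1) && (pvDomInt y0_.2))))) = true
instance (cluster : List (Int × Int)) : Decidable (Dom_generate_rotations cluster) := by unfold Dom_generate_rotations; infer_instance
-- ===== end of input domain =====

-- B replaces A's stateful current-threading rotation loop by an explicit table of the
-- 8 dihedral transforms as closed-form coordinate maps applied directly to the cluster (alternative decomposition).


-- ===== PORT A =====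
-- shared module helper `normalize` (used by both A and B, exactly as in the Python module):
-- min(xs)/min(ys) → PySem.List.min?; sorted of 2-tuples → PySem.List.sorted2 (lexicographic).
-- On the empty cluster Python raises ValueError (zip unpacking); Pre_ excludes it, the `[]` branch is unreachable there.
def normalizePts (cluster : List (Int × Int)) : List (Int × Int) :=
  match PySem.List.min? (cluster.map Prod.fst) (fun v => v),
        PySem.List.min? (cluster.map Prod.snd) (fun v => v) with
  | some mx, some my =>
      PySem.List.sorted2 (cluster.map (fun p => (p.1 - mx, p.2 - my))) Prod.fst Prod.snd
  | _, _ => []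

def rotate_90 (pts : List (Int × Int)) : List (Int × Int) := pts.map (fun p => (-p.2, p.1))
def mirror_x (pts : List (Int × Int)) : List (Int × Int) := pts.map (fun p => (p.1, -p.2))

def generate_rotations (cluster : List (Int × Int)) : List (List (Int × Int)) :=
  let current := normalizePts cluster
  ((List.range 4).foldl
    (fun (st : PySem.Set (List (Int × Int)) × List (Int × Int)) _ =>
      let cur := normalizePts (rotate_90 st.2)
      (PySem.Set.add (PySem.Set.add st.1 cur) (normalizePts (mirror_x cur)), cur))
    (PySem.Set.empty, current)).1

-- ===== PORT B =====
-- the 8 dihedral transforms as closed-form coordinate maps, in B's table order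
def pvTransforms : List ((Int × Int) → (Int × Int)) :=
  [ fun p => (-p.2, p.1),   -- R
    fun p => (-p.2, -p.1),  -- mirror . R
    fun p => (-p.1, -p.2),  -- R^2
    fun p => (-p.1, p.2),   -- mirror . R^2
    fun p => (p.2, -p.1),   -- R^3
    fun p => (p.2, p.1),    -- mirror . R^3
    fun p => (p.1, p.2),    -- identity
    fun p => (p.1, -p.2) ]  -- mirror

def generate_rotations_alt (cluster : List (Int × Int)) : List (List (Int × Int)) :=
  pvTransforms.foldl
    (fun forms t => PySem.Set.add forms (normalizePts (cluster.map t)))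
    PySem.Set.empty

-- ===== PRECONDITION & SPEC =====
-- Pre_ excludes only the empty cluster, on which both A and B raise ValueError (zip unpacking / min of empty).
def Pre_generate_rotations (cluster : List (Int × Int)) : Prop := cluster ≠ []
instance (cluster : List (Int × Int)) : Decidable (Pre_generate_rotations cluster) := by
  unfold Pre_generate_rotations; infer_instance

def pvWitness_generate_rotations : (List (Int × Int)) := [(0, 0), (1, 0)]

def Spec_generate_rotations (cluster : List (Int × Int)) (out : List (List (Int × Int))) : Prop := out = generate_rotations_alt cluster
instance (cluster : List (Int × Int)) (out : List (List (Int × Int))) : Decidable (Spec_generate_rotations cluster out) := by unfold Spec_generate_rotations; infer_instance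

-- ===== CLAIM (what is proved, stated in full; the proofs are below) =====
def Claim_equal_generate_rotations : Prop := ∀ (cluster : List (Int × Int)), Dom_generate_rotations cluster → Pre_generate_rotations cluster → Spec_generate_rotations cluster (generate_rotations cluster)

-- ===== LEMMAS AND PROOFS =====

-- lexicographic ≤ on pairs (Python's tuple order)
def lexle (a b : Int × Int) : Prop := a.1 < b.1 ∨ (a.1 = b.1 ∧ a.2 ≤ b.2)

theorem lexle_trans {a b c : Int × Int} (h1 : lexle a b) (h2 : lexle b c) : lexle a c := by
  unfold lexle at *; omega

theorem lexle_antisymm {a b : Int × Int} (h1 : lexle a b) (h2 : lexle b a) : a = b := by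
  obtain ⟨a1, a2⟩ := a; obtain ⟨b1, b2⟩ := b
  unfold lexle at *; simp_all; omega

-- the boolean strict-lex comparator used by sorted2 with keys fst, snd
def lexlt (a b : Int × Int) : Bool :=
  decide (a.1 < b.1) || (!decide (b.1 < a.1) && decide (a.2 < b.2))

theorem lexle_of_lexlt {a b : Int × Int} (h : lexlt a b = true) : lexle a b := by
  unfold lexlt at h; unfold lexle; simp at h; omega

theorem lexle_of_not_lexlt {a b : Int × Int} (h : ¬ lexlt a b = true) : lexle b a := by
  unfold lexlt at h; unfold lexle; simp at h; omega

theorem pairwise_insertBy_lex (x : Int × Int) (ys : List (Int × Int))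
    (h : ys.Pairwise lexle) :
    (PySem.List.insertBy lexlt x ys).Pairwise lexle := by
  induction ys with
  | nil => simp [PySem.List.insertBy]
  | cons y ys ih =>
    rw [PySem.List.insertBy]
    rcases List.pairwise_cons.1 h with ⟨hy, hys⟩
    split
    · rename_i hb
      refine List.pairwise_cons.2 ⟨?_, h⟩
      intro z hz
      rcases List.mem_cons.1 hz with rfl | hz
      · exact lexle_of_lexlt hb
      · exact lexle_trans (lexle_of_lexlt hb) (hy z hz)
    · rename_i hb
      refine List.pairwise_cons.2 ⟨?_, ih hys⟩
      intro z hz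
      rcases (PySem.List.insertBy_mem_iff _ _ _ _).1 hz with rfl | hz
      · exact lexle_of_not_lexlt hb
      · exact hy z hz

theorem pairwise_sorted2 (xs : List (Int × Int)) :
    (PySem.List.sorted2 xs Prod.fst Prod.snd false).Pairwise lexle := by
  show (xs.foldl (fun acc x => PySem.List.insertBy lexlt x acc) []).Pairwise lexle
  have : ∀ (l : List (Int × Int)) (acc : List (Int × Int)), acc.Pairwise lexle →
      (l.foldl (fun acc x => PySem.List.insertBy lexlt x acc) acc).Pairwise lexle := by
    intro l
    induction l with
    | nil => intro acc h; exact h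
    | cons a l ih => intro acc h; exact ih _ (pairwise_insertBy_lex a acc h)
  exact this xs [] (by simp)

theorem sorted2_congr_perm {xs ys : List (Int × Int)} (h : xs.Perm ys) :
    PySem.List.sorted2 xs Prod.fst Prod.snd false =
    PySem.List.sorted2 ys Prod.fst Prod.snd false := by
  refine List.Perm.eq_of_pairwise ?_ (pairwise_sorted2 xs) (pairwise_sorted2 ys) ?_
  · intro a b _ _ h1 h2; exact lexle_antisymm h1 h2
  · exact ((PySem.List.sorted2_perm xs _ _ false).trans h).trans
      (PySem.List.sorted2_perm ys _ _ false).symm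

theorem min?_id_unique {xs : List Int} {m m' : Int}
    (h : PySem.List.min? xs (fun v => v) = some m)
    (hmem : m' ∈ xs) (hlb : ∀ y ∈ xs, m' ≤ y) : m = m' :=
  le_antisymm (PySem.List.min?_isMin h m' hmem) (hlb m (PySem.List.min?_mem h))

theorem min?_id_some {xs : List Int} (h : xs ≠ []) :
    ∃ m, PySem.List.min? xs (fun v => v) = some m ∧ m ∈ xs ∧ ∀ y ∈ xs, m ≤ y := by
  cases hmin : PySem.List.min? xs (fun v => v) with
  | none => exact absurd ((PySem.List.min?_eq_none_iff xs _).1 hmin) h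
  | some m =>
    exact ⟨m, rfl, PySem.List.min?_mem hmin, PySem.List.min?_isMin hmin⟩

theorem min?_id_perm {xs ys : List Int} (h : xs.Perm ys) :
    PySem.List.min? xs (fun v => v) = PySem.List.min? ys (fun v => v) := by
  rcases eq_or_ne xs [] with rfl | hne
  · rw [h.nil_eq.symm]
  · have hyne : ys ≠ [] := fun hy => hne (by subst hy; exact h.eq_nil)
    obtain ⟨m, hm, hmem, hlb⟩ := min?_id_some hne
    obtain ⟨m', hm', hmem', hlb'⟩ := min?_id_some hyne
    have hmm : m = m' := le_antisymm (hlb m' (h.mem_iff.2 hmem')) (hlb' m (h.mem_iff.1 hmem))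
    rw [hm, hm', hmm]

-- normalize is invariant under permutation of the point list
theorem normalize_congr_perm {xs ys : List (Int × Int)} (h : xs.Perm ys) :
    normalizePts xs = normalizePts ys := by
  unfold normalizePts
  rw [min?_id_perm (h.map Prod.fst), min?_id_perm (h.map Prod.snd)]
  cases PySem.List.min? (ys.map Prod.fst) (fun v => v) with
  | none => rfl
  | some mx =>
    cases PySem.List.min? (ys.map Prod.snd) (fun v => v) with
    | none => rfl
    | some my => exact sorted2_congr_perm (h.map _)

theorem normalizePts_eq (c : List (Int × Int)) (mx my : Int)
    (hmx : PySem.List.min? (c.map Prod.fst) (fun v => v) = some mx)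
    (hmy : PySem.List.min? (c.map Prod.snd) (fun v => v) = some my) :
    normalizePts c = PySem.List.sorted2 (c.map (fun p => (p.1 - mx, p.2 - my))) Prod.fst Prod.snd := by
  unfold normalizePts; rw [hmx, hmy]

-- normalize is invariant under a common translation of all points
theorem normalize_shift (l : List (Int × Int)) (a b : Int) (hne : l ≠ []) :
    normalizePts (l.map (fun p => (p.1 + a, p.2 + b))) = normalizePts l := by
  obtain ⟨mx, hmx, hmxm, hmxl⟩ := min?_id_some (xs := l.map Prod.fst) (by simp [hne])
  obtain ⟨my, hmy, hmym, hmyl⟩ := min?_id_some (xs := l.map Prod.snd) (by simp [hne])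
  have hfx : (l.map (fun p : Int × Int => (p.1 + a, p.2 + b))).map Prod.fst
      = (l.map Prod.fst).map (fun v => v + a) := by simp only [List.map_map]; rfl
  have hfy : (l.map (fun p : Int × Int => (p.1 + a, p.2 + b))).map Prod.snd
      = (l.map Prod.snd).map (fun v => v + b) := by simp only [List.map_map]; rfl
  have hminx : PySem.List.min? ((l.map Prod.fst).map (fun v => v + a)) (fun v => v) = some (mx + a) := by
    obtain ⟨m, hm, hmem, hlb⟩ := min?_id_some (xs := (l.map Prod.fst).map (fun v => v + a)) (by simp [hne])
    have : m = mx + a := min?_id_unique hm (List.mem_map_of_mem hmxm)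
      (by intro y hy; obtain ⟨z, hz, rfl⟩ := List.mem_map.1 hy; have := hmxl z hz; omega)
    rw [hm, this]
  have hminy : PySem.List.min? ((l.map Prod.snd).map (fun v => v + b)) (fun v => v) = some (my + b) := by
    obtain ⟨m, hm, hmem, hlb⟩ := min?_id_some (xs := (l.map Prod.snd).map (fun v => v + b)) (by simp [hne])
    have : m = my + b := min?_id_unique hm (List.mem_map_of_mem hmym)
      (by intro y hy; obtain ⟨z, hz, rfl⟩ := List.mem_map.1 hy; have := hmyl z hz; omega)
    rw [hm, this]
  rw [normalizePts_eq _ (mx + a) (my + b) (by rw [hfx]; exact hminx) (by rw [hfy]; exact hminy),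
      normalizePts_eq _ mx my hmx hmy]
  congr 1
  rw [List.map_map]
  apply List.map_congr_left
  intro p _
  simp only [Function.comp_apply]
  congr 1 <;> ring

-- the key step: normalizing, applying an additive transform, and re-normalizing
-- equals applying the transform to the original cluster and normalizing once
theorem normalize_map_normalize (f : Int × Int → Int × Int)
    (hlin : ∀ p q : Int × Int, f (p.1 + q.1, p.2 + q.2) = ((f p).1 + (f q).1, (f p).2 + (f q).2))
    (c : List (Int × Int)) (hne : c ≠ []) :
    normalizePts ((normalizePts c).map f) = normalizePts (c.map f) := by
  obtain ⟨mx, hmx, hmxm, hmxl⟩ := min?_id_some (xs := c.map Prod.fst) (by simp [hne])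
  obtain ⟨my, hmy, hmym, hmyl⟩ := min?_id_some (xs := c.map Prod.snd) (by simp [hne])
  have hN := normalizePts_eq c mx my hmx hmy
  have hperm : ((normalizePts c).map f).Perm ((c.map (fun p => (p.1 - mx, p.2 - my))).map f) := by
    rw [hN]; exact (PySem.List.sorted2_perm _ _ _ false).map f
  rw [normalize_congr_perm hperm]
  have hmapeq : (c.map (fun p => (p.1 - mx, p.2 - my))).map f
      = (c.map f).map (fun p => (p.1 + (f (-mx, -my)).1, p.2 + (f (-mx, -my)).2)) := by
    rw [List.map_map, List.map_map]
    apply List.map_congr_left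
    intro p _
    simp only [Function.comp]
    have := hlin p (-mx, -my)
    simp only [sub_eq_add_neg]
    exact this
  rw [hmapeq]
  exact normalize_shift (c.map f) _ _ (by simp [hne])

-- additivity of the two generating coordinate maps
theorem lin_rot : ∀ p q : Int × Int,
    (fun p : Int × Int => (-p.2, p.1)) (p.1 + q.1, p.2 + q.2)
      = (((fun p : Int × Int => (-p.2, p.1)) p).1 + ((fun p : Int × Int => (-p.2, p.1)) q).1,
         ((fun p : Int × Int => (-p.2, p.1)) p).2 + ((fun p : Int × Int => (-p.2, p.1)) q).2) := by
  intro p q; simp; ring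

theorem lin_mir : ∀ p q : Int × Int,
    (fun p : Int × Int => (p.1, -p.2)) (p.1 + q.1, p.2 + q.2)
      = (((fun p : Int × Int => (p.1, -p.2)) p).1 + ((fun p : Int × Int => (p.1, -p.2)) q).1,
         ((fun p : Int × Int => (p.1, -p.2)) p).2 + ((fun p : Int × Int => (p.1, -p.2)) q).2) := by
  intro p q; simp; ring

-- ===== VERDICT (by name: the statement is the Claim_ definition above) =====
theorem generate_rotations_spec : Claim_equal_generate_rotations := by
  intro c _ hpre
  have hne : c ≠ [] := hpre
  show generate_rotations c = generate_rotations_alt c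
  have hrange : List.range 4 = [0, 1, 2, 3] := rfl
  have step : ∀ (f g h : (Int × Int) → (Int × Int)),
      (∀ p q : Int × Int, f (p.1 + q.1, p.2 + q.2) = ((f p).1 + (f q).1, (f p).2 + (f q).2)) →
      (∀ p, f (g p) = h p) →
      normalizePts ((normalizePts (c.map g)).map f) = normalizePts (c.map h) := by
    intro f g h hf hfg
    rw [normalize_map_normalize f hf (c.map g) (by simp [hne]), List.map_map]
    congr 1
    apply List.map_congr_left
    intro p _
    exact hfg p
  simp only [generate_rotations, generate_rotations_alt, pvTransforms, hrange,
    List.foldl_cons, List.foldl_nil, rotate_90, mirror_x]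
  rw [normalize_map_normalize _ lin_rot c hne]
  rw [step _ _ (fun p => (-p.2, -p.1)) lin_mir (fun p => rfl)]
  rw [step _ _ (fun p => (-p.1, -p.2)) lin_rot (fun p => rfl)]
  rw [step _ _ (fun p => (-p.1, p.2)) lin_mir (fun p => by simp)]
  rw [step _ _ (fun p => (p.2, -p.1)) lin_rot (fun p => by simp)]
  rw [step _ _ (fun p => (p.2, p.1)) lin_mir (fun p => by simp)]
  rw [step _ _ (fun p => (p.1, p.2)) lin_rot (fun p => by simp)]
  rw [step _ _ (fun p => (p.1, -p.2)) lin_mir (fun p => rfl)]
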